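-- pv_equiv track=rewrite | github.com/Montenigri/NLP | Esercitazioni/eliza.py | risposta
-- ===== SOURCE A (Python) =====
-- neg = ["trist","cattiv","pessim","depress","mort"]
--
-- def risposta(Input):
--     #Controlla se all'interno dell'input è presente una delle stringhe presenti nell'array neg precededute da uno spazio e seguite da un carattere qualsiasi, quindi ritorna la parola trovata compresa di spazio precedente e caratteri seguenti fino al primo spazio
--     parsedInput = ""
--     preprocess = Input.split()
--     for i in neg:
--         for j in preprocess:
--             if j.startswith(i):
--                 return j
--
--     return parsedInput
-- ===== SOURCE B (Python) =====
-- neg = ["trist","cattiv","pessim","depress","mort"]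
--
-- def risposta(Input):
--     # single forward pass over the words, keeping the running best (neg-index, word);
--     # an earlier neg prefix always wins, ties go to the earliest word
--     best_k = None
--     best_w = ""
--     for w in Input.split():
--         k = next((idx for idx, p in enumerate(neg) if w.startswith(p)), None)
--         if k is not None and (best_k is None or k < best_k):
--             best_k, best_w = k, w
--     return best_w
-- ===== Notes on version B (the rewrite author's own statement) =====
-- stated objective: alternative
-- what changed: Inverted A's prefix-outer/word-inner nested scan into a single forward pass over the words that keeps a running minimum (smallest neg-prefix index, earliest word).
import Mathlib
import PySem

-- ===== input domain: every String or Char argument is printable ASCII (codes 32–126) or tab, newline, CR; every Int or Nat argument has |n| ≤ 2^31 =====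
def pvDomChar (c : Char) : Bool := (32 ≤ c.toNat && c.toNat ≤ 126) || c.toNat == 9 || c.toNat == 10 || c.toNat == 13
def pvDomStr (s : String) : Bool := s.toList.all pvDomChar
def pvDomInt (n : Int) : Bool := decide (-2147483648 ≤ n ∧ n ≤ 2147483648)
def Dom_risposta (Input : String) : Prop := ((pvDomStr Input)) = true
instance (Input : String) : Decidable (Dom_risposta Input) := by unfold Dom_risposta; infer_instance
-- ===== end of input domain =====

-- B replaces A's prefix-outer/word-inner nested scan by one forward pass over the
-- words with a running minimum (smallest neg-prefix index, earliest word wins ties).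

-- ===== PORT A =====
def negA : List String := ["trist","cattiv","pessim","depress","mort"]

-- inner loop of A: first word j of the list with j.startswith(i)
def aInner (i : String) : List String → Option String
  | [] => none
  | j :: js => if PySem.Str.startswith j i then some j else aInner i js

-- outer loop of A over the neg prefixes
def aOuter (ws : List String) : List String → String
  | [] => ""
  | i :: is =>
    match aInner i ws with
    | some j => j
    | none => aOuter ws is

def risposta (Input : String) : String :=
  aOuter (PySem.Str.split₀ Input) negA

-- ===== PORT B =====
-- B uses the same fixed prefix list negA

-- smallest index k (counting from the given counter) with w.startswith(neg[k])
def minIdxB (w : String) : List String → Nat → Option Nat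
  | [], _ => none
  | p :: ps, k => if PySem.Str.startswith w p then some k else minIdxB w ps (k + 1)

-- the single pass of B: running best (neg-index, word)
def bLoop : List String → Option Nat → String → String
  | [], _, bw => bw
  | w :: ws, bk, bw =>
    match minIdxB w negA 0 with
    | none => bLoop ws bk bw
    | some k =>
      match bk with
      | none => bLoop ws (some k) w
      | some bk' => if k < bk' then bLoop ws (some k) w else bLoop ws bk bw

def risposta_alt (Input : String) : String :=
  bLoop (PySem.Str.split₀ Input) none ""

-- ===== PRECONDITION & SPEC =====
def Spec_risposta (Input : String) (out : String) : Prop := out = risposta_alt Input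
instance (Input : String) (out : String) : Decidable (Spec_risposta Input out) := by unfold Spec_risposta; infer_instance

-- ===== CLAIM (what is proved, stated in full; the proofs are below) =====
def Claim_equal_risposta : Prop := ∀ (Input : String), Dom_risposta Input → Spec_risposta Input (risposta Input)

-- ===== LEMMAS AND PROOFS =====
-- reference value: the running minimum (neg-index, word) over the word list,
-- combined head-first so that the earliest word wins ties
def combineR : Nat × String → Option (Nat × String) → Nat × String
  | kw, none => kw
  | (k, w), some (k', w') => if k ≤ k' then (k, w) else (k', w')

def Rp (ps : List String) : List String → Option (Nat × String)
  | [] => none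
  | w :: ws =>
    match minIdxB w ps 0 with
    | none => Rp ps ws
    | some k => some (combineR (k, w) (Rp ps ws))

def wordOf : Option (Nat × String) → String
  | none => ""
  | some (_, w) => w

theorem minIdxB_succ (w : String) : ∀ (ps : List String) (k : Nat),
    minIdxB w ps (k + 1) = (minIdxB w ps k).map (· + 1) := by
  intro ps
  induction ps with
  | nil => intro k; simp [minIdxB]
  | cons p ps ih =>
    intro k
    simp only [minIdxB]
    split
    · simp
    · exact ih (k + 1)

theorem Rp_nil (ws : List String) : Rp [] ws = none := by
  induction ws with
  | nil => rfl
  | cons w ws ih => simpa [Rp, minIdxB] using ih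

-- if some word matches the head prefix p, the running minimum over (p :: ps) is
-- (0, first word matching p)
theorem Rp_cons_hit (p : String) (ps : List String) : ∀ (ws : List String) (j : String),
    aInner p ws = some j → Rp (p :: ps) ws = some (0, j) := by
  intro ws
  induction ws with
  | nil => intro j h; simp [aInner] at h
  | cons w ws ih =>
    intro j h
    simp only [aInner] at h
    by_cases hw : PySem.Str.startswith w p
    · simp only [hw, if_pos] at h
      cases h
      simp only [Rp, minIdxB, hw, if_pos]
      cases hr : Rp (p :: ps) ws with
      | none => simp [combineR]
      | some kw =>
        obtain ⟨k', w'⟩ := kw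
        simp [combineR]
    · simp only [hw] at h
      have ihj := ih j h
      simp only [Rp, minIdxB, hw]
      rw [minIdxB_succ]
      cases hm : minIdxB w ps 0 with
      | none => simpa [hm] using ihj
      | some k =>
        simp only [Option.map_some, ihj, combineR]
        have hno : ¬ (k + 1 ≤ 0) := by omega
        simp [hno]

-- if no word matches the head prefix p, dropping p shifts every index by one
theorem Rp_cons_miss (p : String) (ps : List String) : ∀ (ws : List String),
    aInner p ws = none →
    Rp (p :: ps) ws = (Rp ps ws).map (fun x => (x.1 + 1, x.2)) := by
  intro ws
  induction ws with
  | nil => intro _; rfl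
  | cons w ws ih =>
    intro h
    simp only [aInner] at h
    by_cases hw : PySem.Str.startswith w p
    · rw [if_pos hw] at h; cases h
    · simp only [hw] at h
      have ihh := ih h
      simp only [Rp, minIdxB, hw]
      rw [minIdxB_succ]
      cases hm : minIdxB w ps 0 with
      | none => simpa [hm] using ihh
      | some k =>
        simp only [Option.map_some, ihh]
        cases hr : Rp ps ws with
        | none => simp [combineR]
        | some kw =>
          obtain ⟨k', w'⟩ := kw
          simp only [Option.map_some, combineR]
          repeat' split
          all_goals simp_all
          all_goals omega

-- A's nested loops compute the word of the running minimum
theorem aOuter_eq_wordOf_Rp (ws : List String) : ∀ (ps : List String),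
    aOuter ws ps = wordOf (Rp ps ws) := by
  intro ps
  induction ps with
  | nil => simp [aOuter, Rp_nil, wordOf]
  | cons p ps ih =>
    cases h : aInner p ws with
    | some j =>
      simp [aOuter, h, Rp_cons_hit p ps ws j h, wordOf]
    | none =>
      rw [Rp_cons_miss p ps ws h]
      simp only [aOuter, h]
      rw [ih]
      cases hr : Rp ps ws with
      | none => rfl
      | some kw => obtain ⟨k, w⟩ := kw; rfl

-- B's loop with a non-empty accumulator computes the running minimum
theorem bLoop_some (ws : List String) : ∀ (k0 : Nat) (w0 : String),
    bLoop ws (some k0) w0 = (combineR (k0, w0) (Rp negA ws)).2 := by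
  induction ws with
  | nil => intro k0 w0; simp [bLoop, Rp, combineR]
  | cons w ws ih =>
    intro k0 w0
    simp only [bLoop, Rp]
    cases hm : minIdxB w negA 0 with
    | none => exact ih k0 w0
    | some k =>
      by_cases hk : k < k0
      · simp only [hk, if_pos, ih]
        cases hr : Rp negA ws with
        | none =>
          simp only [combineR]
          have hno : ¬ (k0 ≤ k) := by omega
          simp [hno]
        | some kw =>
          obtain ⟨k', w'⟩ := kw
          simp only [combineR]
          repeat' split
          all_goals simp_all
          all_goals omega
      · simp only [hk, if_false, ih]
        cases hr : Rp negA ws with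
        | none =>
          simp only [combineR]
          have hyes : k0 ≤ k := by omega
          simp [hyes]
        | some kw =>
          obtain ⟨k', w'⟩ := kw
          simp only [combineR]
          repeat' split
          all_goals simp_all
          all_goals omega

theorem bLoop_none (ws : List String) :
    bLoop ws none "" = wordOf (Rp negA ws) := by
  induction ws with
  | nil => rfl
  | cons w ws ih =>
    simp only [bLoop, Rp]
    cases hm : minIdxB w negA 0 with
    | none => exact ih
    | some k => simp [bLoop_some, wordOf]

-- ===== VERDICT (by name: the statement is the Claim_ definition above) =====
theorem risposta_spec : Claim_equal_risposta := by
  intro Input _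
  unfold Spec_risposta risposta risposta_alt
  rw [aOuter_eq_wordOf_Rp, bLoop_none]
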